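-- pv_equiv track=rewrite | github.com/kupp1/Coxy | kirc.py | get_real_privmsg
-- ===== SOURCE A (Python) =====
-- def get_real_privmsg(data): #get real msg from irc data
--     n = 0
--     if data.find('PRIVMSG') != -1:
--         for i in range(len(data)):
--             if data[i] == ':':
--                 n += 1
--             if data[i] == ':' and n == 2:
--                 return data[i+1:-3]
--     else:
--         return ''
-- ===== SOURCE B (Python) =====
-- def get_real_privmsg(data):
--     if 'PRIVMSG' not in data:
--         return ''
--     parts = data.split(':', 2)
--     if len(parts) < 3:
--         return None
--     return parts[2][:-3]
-- ===== Notes on version B (the rewrite author's own statement) =====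
-- stated objective: idiomatic
-- what changed: Replaces A's character-by-character scan with a manual colon counter by a single data.split(':', 2) decomposition: the string is broken at the first two colons, a length check reproduces the fall-off-the-end None, and the body is parts[2][:-3].
import Mathlib
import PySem

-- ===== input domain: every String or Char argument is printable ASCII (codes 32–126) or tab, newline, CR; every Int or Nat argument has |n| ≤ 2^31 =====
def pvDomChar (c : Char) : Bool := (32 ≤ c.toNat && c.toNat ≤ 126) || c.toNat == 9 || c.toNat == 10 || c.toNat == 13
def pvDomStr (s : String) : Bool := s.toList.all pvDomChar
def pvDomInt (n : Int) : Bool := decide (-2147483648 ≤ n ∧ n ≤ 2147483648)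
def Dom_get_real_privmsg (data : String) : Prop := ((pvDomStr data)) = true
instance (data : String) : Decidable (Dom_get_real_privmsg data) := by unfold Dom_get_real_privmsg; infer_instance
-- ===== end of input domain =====

-- B replaces A's character-by-character colon-counting loop by one data.split(':', 2)
-- decomposition with a length check; objective: idiomatic.

-- ===== PORT A =====
-- the for-loop over range(len(data)) with its colon counter n; returns at the second ':'
def pvLoopA (data : String) : List Char → Nat → Int → Option String
  | [], _, _ => none
  | c :: rest, i, n =>
      let n' := if c = ':' then n + 1 else n
      if c = ':' ∧ n' = 2 then some (PySem.Str.slice data (some ((i : Int) + 1)) (some (-3)))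
      else pvLoopA data rest (i + 1) n'

def get_real_privmsg (data : String) : Option String :=
  if PySem.Str.find data "PRIVMSG" ≠ -1 then
    pvLoopA data data.toList 0 0
  else
    some ""

-- ===== PORT B =====
-- parts = data.split(':', 2); the .getD [] only discharges splitMax?'s Option
-- (none is impossible: the separator ":" is non-empty)
def get_real_privmsg_alt (data : String) : Option String :=
  if PySem.Str.isIn "PRIVMSG" data = false then
    some ""
  else
    let parts := (PySem.Str.splitMax? data ":" 2).getD []
    if parts.length < 3 then
      none
    else
      (PySem.List.pyGet? parts 2).map (fun p => PySem.Str.slice p none (some (-3)))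

-- ===== PRECONDITION & SPEC =====
def Spec_get_real_privmsg (data : String) (out : Option String) : Prop := out = get_real_privmsg_alt data
instance (data : String) (out : Option String) : Decidable (Spec_get_real_privmsg data out) := by unfold Spec_get_real_privmsg; infer_instance

-- ===== CLAIM (what is proved, stated in full; the proofs are below) =====
def Claim_equal_get_real_privmsg : Prop := ∀ (data : String), Dom_get_real_privmsg data → Spec_get_real_privmsg data (get_real_privmsg data)

-- ===== LEMMAS AND PROOFS =====

-- the loop with counter 1: returns at the next colon
theorem pvLoopA_one (data : String) (rest : List Char) (i : Nat) :
    pvLoopA data rest i 1 =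
      (rest.findIdx? (· = ':')).map
        (fun (j : Nat) => PySem.Str.slice data (some ((i : Int) + (j : Int) + 1)) (some (-3))) := by
  induction rest generalizing i with
  | nil => rfl
  | cons c t ih =>
    rw [pvLoopA]
    by_cases hc : c = ':'
    · simp [hc, List.findIdx?_cons]
    · rw [if_neg (by simp [hc]), if_neg hc, ih]
      cases h : t.findIdx? (· = ':') with
      | none => simp [List.findIdx?_cons, hc, h]
      | some j =>
        simp [List.findIdx?_cons, hc, h]
        ring_nf

-- the loop with counter 0: skip to the first colon, then continue with counter 1
theorem pvLoopA_zero (data : String) (rest : List Char) (i : Nat) :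
    pvLoopA data rest i 0 =
      (rest.findIdx? (· = ':')).elim none
        (fun j => pvLoopA data (rest.drop (j + 1)) (i + j + 1) 1) := by
  induction rest generalizing i with
  | nil => rfl
  | cons c t ih =>
    rw [pvLoopA]
    by_cases hc : c = ':'
    · simp [hc, List.findIdx?_cons]
    · rw [if_neg (by simp [hc]), if_neg hc, ih]
      cases h : t.findIdx? (· = ':') with
      | none => simp [List.findIdx?_cons, hc, h]
      | some j =>
        have he : i + 1 + j + 1 = i + (j + 1) + 1 := by omega
        simp [List.findIdx?_cons, hc, h, List.drop_succ_cons, he]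

-- split's worker with maxsplit budget 0: the rest is one final piece
theorem pvGo0 (l : List Char) (fuel : Nat) (acc : List (List Char)) :
    PySem.Chars.splitOnMax.go [':'] fuel 0 l [] acc = (l :: acc).reverse := by
  cases fuel with
  | zero => cases l <;> simp [PySem.Chars.splitOnMax.go]
  | succ f => cases l <;> simp [PySem.Chars.splitOnMax.go]

-- split's worker with budget 1: split at the next colon (if any)
theorem pvGo1 (l : List Char) (fuel : Nat) (cur : List Char) (acc : List (List Char))
    (h : l.length < fuel) :
    PySem.Chars.splitOnMax.go [':'] fuel 1 l cur acc =
      match l.findIdx? (· = ':') with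
      | none => ((cur.reverse ++ l) :: acc).reverse
      | some j => (l.drop (j + 1) :: (cur.reverse ++ l.take j) :: acc).reverse := by
  induction l generalizing fuel cur acc with
  | nil =>
    cases fuel with
    | zero => omega
    | succ f => simp [PySem.Chars.splitOnMax.go]
  | cons c t ih =>
    cases fuel with
    | zero => omega
    | succ f =>
      by_cases hc : c = ':'
      · simp [PySem.Chars.splitOnMax.go, hc, List.findIdx?_cons, pvGo0]
      · have hp : [':'].isPrefixOf (c :: t) = false := by
          simp [List.isPrefixOf]
          exact fun h => hc h.symm
        rw [PySem.Chars.splitOnMax.go]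
        simp only [hp, if_neg (by omega : ¬ (1 : Nat) = 0), Bool.false_eq_true, if_false]
        rw [ih f (c :: cur) acc (by simpa using Nat.lt_of_succ_lt_succ h)]
        cases ht : t.findIdx? (· = ':') with
        | none => simp [List.findIdx?_cons, hc, ht]
        | some j => simp [List.findIdx?_cons, hc, ht]

-- split's worker with budget 2: split at the first two colons (as far as they exist)
theorem pvGo2 (l : List Char) (fuel : Nat) (cur : List Char) (acc : List (List Char))
    (h : l.length < fuel) :
    PySem.Chars.splitOnMax.go [':'] fuel 2 l cur acc =
      match l.findIdx? (· = ':') with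
      | none => ((cur.reverse ++ l) :: acc).reverse
      | some i =>
        match (l.drop (i + 1)).findIdx? (· = ':') with
        | none => (l.drop (i + 1) :: (cur.reverse ++ l.take i) :: acc).reverse
        | some j =>
          ((l.drop (i + 1)).drop (j + 1) :: (l.drop (i + 1)).take j ::
            (cur.reverse ++ l.take i) :: acc).reverse := by
  induction l generalizing fuel cur acc with
  | nil =>
    cases fuel with
    | zero => omega
    | succ f => simp [PySem.Chars.splitOnMax.go]
  | cons c t ih =>
    cases fuel with
    | zero => omega
    | succ f =>
      by_cases hc : c = ':'
      · rw [PySem.Chars.splitOnMax.go]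
        have hp : [':'].isPrefixOf (c :: t) = true := by
          simp [List.isPrefixOf, hc]
        simp only [hp, if_neg (by omega : ¬ (2 : Nat) = 0), if_true]
        rw [show (2 - 1 : Nat) = 1 from rfl,
          show List.drop [':'].length (c :: t) = t from rfl]
        rw [pvGo1 t f [] (cur.reverse :: acc) (by simpa using Nat.lt_of_succ_lt_succ h)]
        cases ht : t.findIdx? (· = ':') with
        | none => simp [List.findIdx?_cons, hc, ht]
        | some j => simp [List.findIdx?_cons, hc, ht]
      · have hp : [':'].isPrefixOf (c :: t) = false := by
          simp [List.isPrefixOf]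
          exact fun h => hc h.symm
        rw [PySem.Chars.splitOnMax.go]
        simp only [hp, if_neg (by omega : ¬ (2 : Nat) = 0), Bool.false_eq_true, if_false]
        rw [ih f (c :: cur) acc (by simpa using Nat.lt_of_succ_lt_succ h)]
        cases ht : t.findIdx? (· = ':') with
        | none => simp [List.findIdx?_cons, hc, ht]
        | some j =>
          cases ht2 : (t.drop (j + 1)).findIdx? (· = ':') with
          | none => simp [List.findIdx?_cons, hc, ht, ht2]
          | some j2 => simp [List.findIdx?_cons, hc, ht, ht2]

-- data.split(':', 2) in closed form over the first two colon positions
theorem pvSplit2 (s : List Char) :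
    PySem.Chars.splitOnMax s [':'] 2 =
      match s.findIdx? (· = ':') with
      | none => [s]
      | some i =>
        match (s.drop (i + 1)).findIdx? (· = ':') with
        | none => [s.take i, s.drop (i + 1)]
        | some j =>
          [s.take i, (s.drop (i + 1)).take j, (s.drop (i + 1)).drop (j + 1)] := by
  rw [PySem.Chars.splitOnMax, if_neg (by omega : ¬ (2 : Int) < 0)]
  rw [show (2 : Int).toNat = 2 from rfl]
  rw [pvGo2 s (s.length + 1) [] [] (by omega)]
  cases h1 : s.findIdx? (· = ':') with
  | none => simp
  | some i =>
    cases h2 : (s.drop (i + 1)).findIdx? (· = ':') with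
    | none => simp
    | some j => simp

-- xs[k:-3] = (xs[k:])[:-3] for 0 ≤ k ≤ len
theorem pvSliceDrop (xs : List Char) (k : Nat) (hk : k ≤ xs.length) :
    PySem.List.slice xs (some (k : Int)) (some (-3)) =
      PySem.List.slice (xs.drop k) none (some (-3)) := by
  simp only [PySem.List.slice, PySem.List.clampIdx, List.length_drop]
  norm_num
  rw [if_neg (by omega : ¬ ((k : Int) < 0)), min_eq_left hk]
  congr 1
  split_ifs <;> omega

-- findIdx? returns an index within bounds
theorem pvFindIdxLt {cs : List Char} {j : Nat} (h : cs.findIdx? (· = ':') = some j) :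
    j < cs.length := by
  rw [List.findIdx?_eq_some_iff_getElem] at h
  exact h.1

-- ===== VERDICT (by name: the statement is the Claim_ definition above) =====
theorem get_real_privmsg_spec : Claim_equal_get_real_privmsg := by
  intro data _
  unfold Spec_get_real_privmsg get_real_privmsg get_real_privmsg_alt
  have hiff : (PySem.Str.find data "PRIVMSG" = -1) ↔ (PySem.Str.isIn "PRIVMSG" data = false) := by
    rw [PySem.Str.find_eq, PySem.Str.isIn_eq, PySem.Chars.find_eq_neg_one_iff,
      PySem.Chars.isIn_eq_false_iff]
  by_cases hp : PySem.Str.find data "PRIVMSG" = -1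
  · rw [if_neg (not_not_intro hp), if_pos (hiff.mp hp)]
  · rw [if_pos hp, if_neg (fun h => hp (hiff.mpr h))]
    have hsplit : (PySem.Str.splitMax? data ":" 2).getD [] =
        (PySem.Chars.splitOnMax data.toList [':'] 2).map String.ofList := by
      rw [PySem.Str.splitMax?]
      have : (":".toList) = [':'] := by decide
      rw [this, PySem.Chars.splitMax?]
      simp
    rw [pvLoopA_zero, hsplit, pvSplit2]
    cases h1 : data.toList.findIdx? (· = ':') with
    | none => simp
    | some i =>
      simp only [Option.elim]
      rw [pvLoopA_one]
      cases h2 : (data.toList.drop (i + 1)).findIdx? (· = ':') with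
      | none => simp
      | some j =>
        have hi := pvFindIdxLt h1
        have hj := pvFindIdxLt h2
        simp only [Option.map_some, List.map_cons, List.map_nil,
          List.length_cons, List.length_nil]
        rw [if_neg (by omega)]
        have hidx : PySem.List.pyGet?
            [String.ofList (data.toList.take i),
             String.ofList ((data.toList.drop (i + 1)).take j),
             String.ofList ((data.toList.drop (i + 1)).drop (j + 1))] (2 : Int) =
            some (String.ofList ((data.toList.drop (i + 1)).drop (j + 1))) := by
          rw [show (2 : Int) = ((2 : Nat) : Int) from rfl, PySem.List.pyGet?_natCast]
          rfl
        rw [hidx]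
        simp only [Option.map_some, Option.some.injEq]
        unfold PySem.Str.slice
        refine congrArg String.ofList ?_
        simp only [PySem.Chars.slice_eq_listSlice, String.toList_ofList]
        rw [List.drop_drop]
        have hc : (((0 + i + 1 : Nat) : Int) + (j : Int) + 1) = (((j + 1 + (i + 1) : Nat)) : Int) := by
          push_cast; ring
        rw [hc, pvSliceDrop data.toList (j + 1 + (i + 1)) (by simp at hj ⊢; omega)]
        congr 2
        omega
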